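-- pv_equiv track=rewrite | github.com/Diya-999/text2table2graph | df2json.py | add_newline
-- ===== SOURCE A (Python) =====
-- def add_newline(s, split_sign=' ', word_index=3):
--     split_s = s.split(split_sign)
--     if word_index >= len(split_s):
--         return s
--     for i in range(word_index, len(split_s), word_index):
--         split_s[i-1] += '\n'
--     new_string = split_sign.join(split_s)
--     return new_string
-- ===== SOURCE B (Python) =====
-- def add_newline(s, split_sign=' ', word_index=3):
--     words = s.split(split_sign)
--     if word_index >= len(words):
--         return s
--     segments = []
--     prev = 0
--     for cut in range(word_index, len(words), word_index):
--         segments.append(split_sign.join(words[prev:cut]))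
--         prev = cut
--     segments.append(split_sign.join(words[prev:]))
--     return ('\n' + split_sign).join(segments)
-- ===== Notes on version B (the rewrite author's own statement) =====
-- stated objective: alternative
-- what changed: B partitions the word list into consecutive chunks at the cut indices and joins the chunks with the newline-prefixed separator, instead of A's in-place appending of a newline to individual words followed by a single join.
import Mathlib
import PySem

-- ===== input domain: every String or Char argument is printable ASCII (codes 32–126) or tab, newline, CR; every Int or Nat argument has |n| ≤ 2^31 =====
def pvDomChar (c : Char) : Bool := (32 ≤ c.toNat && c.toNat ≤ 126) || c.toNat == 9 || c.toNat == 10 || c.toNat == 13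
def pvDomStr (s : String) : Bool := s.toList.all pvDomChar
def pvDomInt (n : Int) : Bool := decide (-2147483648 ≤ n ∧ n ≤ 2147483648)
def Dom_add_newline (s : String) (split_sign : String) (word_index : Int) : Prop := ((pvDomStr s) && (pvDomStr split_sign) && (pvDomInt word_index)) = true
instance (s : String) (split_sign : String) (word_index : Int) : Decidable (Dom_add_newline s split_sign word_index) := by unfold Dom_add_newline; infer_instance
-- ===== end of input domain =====

-- B partitions the word list into chunks at the cut indices and rejoins the chunks with the
-- newline-prefixed separator, instead of A's in-place newline-appending to individual words;
-- same cost, different decomposition.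

-- ===== PORT A =====
def add_newline (s : String) (split_sign : String) (word_index : Int) : String :=
  match PySem.Str.split? s split_sign with
  | none => s        -- unreachable under Pre_ (split_sign ≠ ""): Python raises ValueError here
  | some split_s =>
    if word_index ≥ PySem.List.len split_s then s
    else
      let marked := (PySem.List.pyRange word_index (PySem.List.len split_s) word_index).foldl
        (fun l i => PySem.List.pySetD l (i - 1) (PySem.List.pyGetD l (i - 1) "" ++ "\n")) split_s
      PySem.Str.join split_sign marked

-- ===== PORT B =====
def add_newline_alt (s : String) (split_sign : String) (word_index : Int) : String :=
  match PySem.Str.split? s split_sign with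
  | none => s        -- unreachable under Pre_ (split_sign ≠ ""): Python raises ValueError here
  | some words =>
    if word_index ≥ PySem.List.len words then s
    else
      let st := (PySem.List.pyRange word_index (PySem.List.len words) word_index).foldl
        (fun (acc : List String × Int) cut =>
          (acc.1 ++ [PySem.Str.join split_sign (PySem.List.slice words (some acc.2) (some cut))], cut))
        ([], 0)
      let segments := st.1 ++ [PySem.Str.join split_sign (PySem.List.slice words (some st.2) none)]
      PySem.Str.join ("\n" ++ split_sign) segments

-- ===== PRECONDITION & SPEC =====
-- Pre_ excludes exactly the inputs where Python A raises: an empty split_sign (ValueError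
-- from str.split) and word_index = 0 (ValueError from range with step 0); B raises there too.
def Pre_add_newline (s : String) (split_sign : String) (word_index : Int) : Prop :=
  split_sign ≠ "" ∧ word_index ≠ 0
instance (s : String) (split_sign : String) (word_index : Int) : Decidable (Pre_add_newline s split_sign word_index) := by unfold Pre_add_newline; infer_instance
def pvWitness_add_newline : String × String × Int := ("a b c d e", " ", 2)

def Spec_add_newline (s : String) (split_sign : String) (word_index : Int) (out : String) : Prop := out = add_newline_alt s split_sign word_index
instance (s : String) (split_sign : String) (word_index : Int) (out : String) : Decidable (Spec_add_newline s split_sign word_index out) := by unfold Spec_add_newline; infer_instance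

-- ===== CLAIM (what is proved, stated in full; the proofs are below) =====
def Claim_equal_add_newline : Prop := ∀ (s : String) (split_sign : String) (word_index : Int), Dom_add_newline s split_sign word_index → Pre_add_newline s split_sign word_index → Spec_add_newline s split_sign word_index (add_newline s split_sign word_index)

-- ===== LEMMAS AND PROOFS =====

theorem pyRange_pos_nil (a b s : Int) (hs : 0 < s) (h : b ≤ a) :
    PySem.List.pyRange a b s = [] := by
  simp only [PySem.List.pyRange, hs.ne', if_false, hs, if_true, show ¬ a < b by omega]
  simp

theorem pyRange_neg_nil (a b s : Int) (hs : s < 0) (h : a ≤ b) :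
    PySem.List.pyRange a b s = [] := by
  simp only [PySem.List.pyRange, hs.ne, if_false, show ¬ 0 < s by omega, show ¬ b < a by omega]
  simp

theorem pyRange_pos_cons (a b s : Int) (hs : 0 < s) (h : a < b) :
    PySem.List.pyRange a b s = a :: PySem.List.pyRange (a + s) b s := by
  simp only [PySem.List.pyRange, hs.ne', if_false, hs, if_true, h]
  by_cases h2 : a + s < b
  · simp only [h2, if_true]
    have key : b - a + s - 1 = (b - (a + s) + s - 1) + 1 * s := by ring
    have e1 : (b - a + s - 1) / s = (b - (a + s) + s - 1) / s + 1 := by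
      rw [key, Int.add_mul_ediv_right _ _ hs.ne']
    have hnn : 0 ≤ (b - (a + s) + s - 1) / s := Int.ediv_nonneg (by omega) (by omega)
    have e2 : ((b - a + s - 1) / s).toNat = ((b - (a + s) + s - 1) / s).toNat + 1 := by
      omega
    rw [e2, List.range_succ_eq_map]
    simp only [List.map_cons, List.map_map]
    congr 1
    · push_cast; ring
    · apply List.map_congr_left; intro k _; simp [Function.comp]; ring
  · simp only [h2, if_false]
    have e1 : (b - a + s - 1) / s = 1 := by
      have key : b - a + s - 1 = (b - a - 1) + 1 * s := by ring
      rw [key, Int.add_mul_ediv_right _ _ hs.ne',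
        Int.ediv_eq_zero_of_lt (by omega) (by omega)]
      norm_num
    simp [e1]

theorem pyRange_pos_mem_aux (b s : Int) (hs : 0 < s) :
    ∀ (n : Nat) (a : Int), (b - a).toNat ≤ n → ∀ x ∈ PySem.List.pyRange a b s, a ≤ x ∧ x < b := by
  intro n
  induction n with
  | zero =>
    intro a hle x hx
    rw [pyRange_pos_nil a b s hs (by omega)] at hx
    simp at hx
  | succ n ih =>
    intro a hle x hx
    by_cases h : a < b
    · rw [pyRange_pos_cons a b s hs h] at hx
      rcases List.mem_cons.mp hx with rfl | hx
      · omega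
      · have := ih (a + s) (by omega) x hx
        omega
    · rw [pyRange_pos_nil a b s hs (by omega)] at hx
      simp at hx

theorem pyRange_pos_mem (a b s : Int) (hs : 0 < s) :
    ∀ x ∈ PySem.List.pyRange a b s, a ≤ x ∧ x < b :=
  pyRange_pos_mem_aux b s hs (b - a).toNat a le_rfl

theorem pyRange_pos_pairwise_aux (b s : Int) (hs : 0 < s) :
    ∀ (n : Nat) (a : Int), (b - a).toNat ≤ n → (PySem.List.pyRange a b s).Pairwise (· < ·) := by
  intro n
  induction n with
  | zero =>
    intro a hle
    rw [pyRange_pos_nil a b s hs (by omega)]; simp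
  | succ n ih =>
    intro a hle
    by_cases h : a < b
    · rw [pyRange_pos_cons a b s hs h]
      refine List.pairwise_cons.mpr ⟨?_, ih (a + s) (by omega)⟩
      intro x hx
      have := (pyRange_pos_mem (a + s) b s hs x hx).1
      omega
    · rw [pyRange_pos_nil a b s hs (by omega)]; simp

theorem pyRange_pos_pairwise (a b s : Int) (hs : 0 < s) :
    (PySem.List.pyRange a b s).Pairwise (· < ·) :=
  pyRange_pos_pairwise_aux b s hs (b - a).toNat a le_rfl

theorem joinS_singleton (sep x : String) : PySem.Str.join sep [x] = x := by
  apply String.toList_inj.mp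
  simp [PySem.Str.toList_join, PySem.Chars.join_singleton]

theorem joinS_cons_cons (sep p q : String) (r : List String) :
    PySem.Str.join sep (p :: q :: r) = p ++ sep ++ PySem.Str.join sep (q :: r) := by
  apply String.toList_inj.mp
  simp [PySem.Str.toList_join, PySem.Chars.join_cons_cons]

theorem joinS_append (sep : String) (xs ys : List String) (hx : xs ≠ []) (hy : ys ≠ []) :
    PySem.Str.join sep (xs ++ ys) = PySem.Str.join sep xs ++ sep ++ PySem.Str.join sep ys := by
  induction xs with
  | nil => simp at hx
  | cons a t ih =>
    cases t with
    | nil =>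
      cases ys with
      | nil => simp at hy
      | cons y ys' => simp [joinS_cons_cons, joinS_singleton]
    | cons b t' =>
      have : ((a :: b :: t') ++ ys) = a :: ((b :: t') ++ ys) := by simp
      rw [this]
      have hcons : (b :: t') ++ ys = b :: (t' ++ ys) := by simp
      rw [hcons, joinS_cons_cons, ← hcons, ih (by simp), joinS_cons_cons]
      simp [String.append_assoc]

def markN (l : List String) (c : Nat) : List String := l.set (c - 1) (l.getD (c - 1) "" ++ "\n")

theorem length_markN (l : List String) (c : Nat) : (markN l c).length = l.length := by
  simp [markN]

theorem length_foldl_markN (cuts : List Nat) (l : List String) :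
    (cuts.foldl markN l).length = l.length := by
  induction cuts generalizing l with
  | nil => rfl
  | cons c cs ih => simp [List.foldl_cons, ih, length_markN]

theorem joinS_mark_last (sep t : String) (l : List String) (h : l ≠ []) :
    PySem.Str.join sep (l.set (l.length - 1) (l.getD (l.length - 1) "" ++ t)) =
      PySem.Str.join sep l ++ t := by
  induction l with
  | nil => simp at h
  | cons a m ih =>
    cases m with
    | nil => simp [joinS_singleton]
    | cons b m' =>
      have hlen : (a :: b :: m').length - 1 = ((b :: m').length - 1) + 1 := by simp
      rw [hlen]
      simp only [List.set_cons_succ, List.getD_cons_succ]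
      have hne : (b :: m').set ((b :: m').length - 1) ((b :: m').getD ((b :: m').length - 1) "" ++ t) ≠ [] := by
        simp
      cases hset : (b :: m').set ((b :: m').length - 1) ((b :: m').getD ((b :: m').length - 1) "" ++ t) with
      | nil => exact absurd hset hne
      | cons q r =>
        calc PySem.Str.join sep (a :: q :: r)
            = a ++ sep ++ PySem.Str.join sep (q :: r) := joinS_cons_cons ..
          _ = a ++ sep ++ (PySem.Str.join sep (b :: m') ++ t) := by
              rw [← hset, ih (by simp)]
          _ = PySem.Str.join sep (a :: b :: m') ++ t := by
              rw [joinS_cons_cons sep a b m']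
              simp [String.append_assoc]

theorem foldA_nat (cuts : List Int) (l : List String)
    (hb : ∀ c ∈ cuts, 1 ≤ c ∧ c < (l.length : Int)) :
    cuts.foldl (fun l i => PySem.List.pySetD l (i - 1) (PySem.List.pyGetD l (i - 1) "" ++ "\n")) l
      = (cuts.map Int.toNat).foldl markN l := by
  induction cuts generalizing l with
  | nil => rfl
  | cons c cs ih =>
    obtain ⟨h1, h2⟩ := hb c (List.mem_cons_self ..)
    have step : PySem.List.pySetD l (c - 1) (PySem.List.pyGetD l (c - 1) "" ++ "\n") = markN l c.toNat := by
      rw [PySem.List.pySetD_of_nonneg _ _ (by omega),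
        PySem.List.pyGetD_eq_getElem _ _ (by omega) (by omega)]
      unfold markN
      congr 1 <;> try omega
      rw [List.getD_eq_getElem _ _ (by omega)]
      congr 2
      omega
    simp only [List.map_cons, List.foldl_cons, step]
    apply ih
    intro x hx
    have := hb x (List.mem_cons_of_mem _ hx)
    simpa [markN] using this

theorem markN_shift (cuts : List Nat) (l : List String) (p : Nat)
    (hb : ∀ c ∈ cuts, p < c ∧ c < l.length) :
    cuts.foldl markN l = l.take p ++ (cuts.map (· - p)).foldl markN (l.drop p) := by
  induction cuts generalizing l with
  | nil => simp
  | cons c cs ih =>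
    obtain ⟨h1, h2⟩ := hb c (List.mem_cons_self ..)
    have hp_len : (List.take p l).length = p := List.length_take_of_le (by omega)
    have hidx : c - 1 - p = c - p - 1 := by omega
    have hstep : markN l c = l.take p ++ markN (l.drop p) (c - p) := by
      calc markN l c
          = (l.take p ++ l.drop p).set (c - 1)
              ((l.take p ++ l.drop p).getD (c - 1) "" ++ "\n") := by
            rw [List.take_append_drop]; rfl
        _ = l.take p ++ (l.drop p).set (c - 1 - p)
              ((l.drop p).getD (c - 1 - p) "" ++ "\n") := by
            rw [List.set_append_right _ _ (by rw [hp_len]; omega),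
              List.getD_append_right _ _ _ _ (by rw [hp_len]; omega), hp_len]
        _ = l.take p ++ markN (l.drop p) (c - p) := by
            unfold markN; rw [hidx]
    rw [List.foldl_cons, ih (markN l c) (fun x hx => by
        have := hb x (List.mem_cons_of_mem _ hx)
        simpa [length_markN] using this),
      hstep]
    simp only [List.map_cons, List.foldl_cons]
    congr 1
    · rw [List.take_append_of_le_length (by omega), List.take_take]
      simp
    · congr 1
      rw [List.drop_append_of_le_length (by omega)]
      have hnil : List.drop p (List.take p l) = [] := by
        apply List.drop_eq_nil_of_le
        omega
      rw [hnil]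
      simp

def segsR (sep : String) (ws : List String) : List Nat → List String
  | [] => [PySem.Str.join sep ws]
  | c :: cs => PySem.Str.join sep (ws.take c) :: segsR sep (ws.drop c) (cs.map (· - c))
  termination_by cuts => cuts.length
  decreasing_by simp

theorem segsR_ne_nil (sep : String) (ws : List String) (cuts : List Nat) :
    segsR sep ws cuts ≠ [] := by
  cases cuts <;> simp [segsR]

theorem main_join (sep : String) (cuts : List Nat) (ws : List String)
    (hp : cuts.Pairwise (· < ·)) (hb : ∀ c ∈ cuts, 0 < c ∧ c < ws.length) :
    PySem.Str.join sep (cuts.foldl markN ws)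
      = PySem.Str.join ("\n" ++ sep) (segsR sep ws cuts) := by
  induction hn : cuts.length using Nat.strong_induction_on generalizing cuts ws with
  | _ n ih =>
    cases cuts with
    | nil => simp [segsR, joinS_singleton]
    | cons c cs =>
      obtain ⟨hlt, hp'⟩ := List.pairwise_cons.mp hp
      obtain ⟨h1, h2⟩ := hb c (List.mem_cons_self ..)
      rw [List.foldl_cons,
        markN_shift cs (markN ws c) c (fun x hx => by
          have h3 := hlt x hx
          have h4 := hb x (List.mem_cons_of_mem _ hx)
          simp [length_markN]
          omega)]
      have hlen_take : (ws.take c).length = c := List.length_take_of_le (by omega)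
      have htake : (markN ws c).take c
          = (ws.take c).set ((ws.take c).length - 1) ((ws.take c).getD ((ws.take c).length - 1) "" ++ "\n") := by
        unfold markN
        rw [List.take_set, hlen_take]
        congr 2
        rw [List.getD_eq_getElem _ _ (by omega), List.getD_eq_getElem _ _ (by rw [hlen_take]; omega)]
        rw [List.getElem_take]
      have hdrop : (markN ws c).drop c = ws.drop c := by
        unfold markN
        rw [List.drop_set, if_pos (by omega)]
      rw [htake, hdrop]
      have hY : ∀ X : List String, (cs.map (· - c)).foldl markN (ws.drop c) = (cs.map (· - c)).foldl markN (ws.drop c) := fun _ => rfl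
      have hYne : (cs.map (· - c)).foldl markN (ws.drop c) ≠ [] := by
        have := length_foldl_markN (cs.map (· - c)) (ws.drop c)
        intro hnil
        rw [hnil] at this
        simp at this
        omega
      have hXne : (ws.take c).set ((ws.take c).length - 1) ((ws.take c).getD ((ws.take c).length - 1) "" ++ "\n") ≠ [] := by
        intro hnil
        have := congrArg List.length hnil
        simp [hlen_take] at this
        omega
      rw [joinS_append _ _ _ hXne hYne]
      rw [joinS_mark_last _ _ _ (by
        intro hnil
        have := congrArg List.length hnil
        simp [hlen_take] at this
        omega)]
      have hih := ih (cs.map (· - c)).length (by simp [← hn]) (cs.map (· - c)) (ws.drop c)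
        (by
          refine List.pairwise_map.mpr ?_
          refine hp'.imp_of_mem ?_
          intro a b ha hb2 hab
          have := hlt a ha
          omega)
        (by
          intro x hx
          obtain ⟨y, hy, rfl⟩ := List.mem_map.mp hx
          have := hlt y hy
          have := (hb y (List.mem_cons_of_mem _ hy)).2
          constructor <;> [omega; (simp; omega)])
        rfl
      rw [hih]
      show _ = PySem.Str.join ("\n" ++ sep) (segsR sep ws (c :: cs))
      rw [show segsR sep ws (c :: cs) = PySem.Str.join sep (ws.take c) :: segsR sep (ws.drop c) (cs.map (· - c)) from by rw [segsR]]
      cases hseg : segsR sep (ws.drop c) (cs.map (· - c)) with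
      | nil => exact absurd hseg (segsR_ne_nil _ _ _)
      | cons z zs =>
        rw [joinS_cons_cons]
        simp [String.append_assoc]

def segStep (sep : String) (ws : List String) (acc : List String × Nat) (c : Nat) : List String × Nat :=
  (acc.1 ++ [PySem.Str.join sep ((ws.drop acc.2).take (c - acc.2))], c)

theorem foldB_nat (sep : String) (ws : List String) (cuts : List Int) (acc : List String) (prev : Nat)
    (hb : ∀ c ∈ cuts, 0 ≤ c) :
    cuts.foldl (fun (acc : List String × Int) cut =>
        (acc.1 ++ [PySem.Str.join sep (PySem.List.slice ws (some acc.2) (some cut))], cut))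
        (acc, (prev : Int))
      = (((cuts.map Int.toNat).foldl (segStep sep ws) (acc, prev)).1,
         (((cuts.map Int.toNat).foldl (segStep sep ws) (acc, prev)).2 : Int)) := by
  induction cuts generalizing acc prev with
  | nil => rfl
  | cons c cs ih =>
    have hc : 0 ≤ c := hb c (List.mem_cons_self ..)
    simp only [List.foldl_cons, List.map_cons]
    have hslice : PySem.List.slice ws (some ((prev : Nat) : Int)) (some c)
        = (ws.drop prev).take (c.toNat - prev) := by
      rw [PySem.List.slice_toNat _ (by omega) hc]
      simp
    rw [hslice]
    have hcast : c = ((c.toNat : Nat) : Int) := by omega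
    rw [hcast]
    simp only [Int.toNat_natCast]
    rw [ih (acc ++ [PySem.Str.join sep ((ws.drop prev).take (c.toNat - prev))]) c.toNat
      (fun x hx => hb x (List.mem_cons_of_mem _ hx))]
    rfl

theorem foldB_segs (sep : String) (ws : List String) (cuts : List Nat) (acc : List String) (prev : Nat)
    (hp : cuts.Pairwise (· < ·)) (hb : ∀ c ∈ cuts, prev < c ∧ c < ws.length) :
    (cuts.foldl (segStep sep ws) (acc, prev)).1
        ++ [PySem.Str.join sep (ws.drop (cuts.foldl (segStep sep ws) (acc, prev)).2)]
      = acc ++ segsR sep (ws.drop prev) (cuts.map (· - prev)) := by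
  induction cuts generalizing acc prev with
  | nil => simp [segsR]
  | cons c cs ih =>
    obtain ⟨hlt, hp'⟩ := List.pairwise_cons.mp hp
    obtain ⟨h1, h2⟩ := hb c (List.mem_cons_self ..)
    simp only [List.foldl_cons, List.map_cons, segStep]
    rw [ih (acc ++ [PySem.Str.join sep ((ws.drop prev).take (c - prev))]) c hp'
      (fun x hx => ⟨(hlt x hx), (hb x (List.mem_cons_of_mem _ hx)).2⟩)]
    rw [show segsR sep (ws.drop prev) ((c - prev) :: cs.map (· - prev))
        = PySem.Str.join sep ((ws.drop prev).take (c - prev))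
          :: segsR sep ((ws.drop prev).drop (c - prev)) ((cs.map (· - prev)).map (· - (c - prev)))
      from by rw [segsR]]
    rw [List.drop_drop, show prev + (c - prev) = c by omega]
    rw [List.map_map]
    rw [show cs.map ((fun x => x - (c - prev)) ∘ (fun x => x - prev)) = cs.map (· - c) from by
      apply List.map_congr_left
      intro x hx
      have := hlt x hx
      simp
      omega]
    simp


theorem add_newline_eq (s split_sign : String) (word_index : Int)
    (hpre : Pre_add_newline s split_sign word_index) :
    add_newline s split_sign word_index = add_newline_alt s split_sign word_index := by
  obtain ⟨hsep, hwi⟩ := hpre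
  unfold add_newline add_newline_alt
  cases hsp : PySem.Str.split? s split_sign with
  | none => rfl
  | some ws =>
    simp only []
    by_cases hge : word_index ≥ PySem.List.len ws
    · have h' : (↑ws.length : Int) ≤ word_index := by
        simpa [PySem.List.len_eq, ge_iff_le] using hge
      simp [PySem.List.len_eq, h']
    · simp only [if_neg hge]
      have hlen : PySem.List.len ws = (ws.length : Int) := by simp [PySem.List.len_eq]
      rw [hlen] at hge ⊢
      have hlt : word_index < (ws.length : Int) := by omega
      by_cases hpos : 0 < word_index
      · -- positive step
        set cuts := PySem.List.pyRange word_index (ws.length : Int) word_index with hcuts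
        have hmem := pyRange_pos_mem word_index (ws.length : Int) word_index hpos
        have hpair := pyRange_pos_pairwise word_index (ws.length : Int) word_index hpos
        have hpairN : (cuts.map Int.toNat).Pairwise (· < ·) := by
          refine List.pairwise_map.mpr (hpair.imp_of_mem ?_)
          intro a b ha hb hab
          have := (hmem a ha).1
          omega
        have hbN : ∀ c ∈ cuts.map Int.toNat, 0 < c ∧ c < ws.length := by
          intro c hc
          obtain ⟨y, hy, rfl⟩ := List.mem_map.mp hc
          have := hmem y hy
          omega
        -- A side
        rw [foldA_nat cuts ws (fun c hc => by have := hmem c hc; constructor <;> omega)]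
        rw [main_join split_sign (cuts.map Int.toNat) ws hpairN hbN]
        -- B side
        rw [show (0 : Int) = ((0 : Nat) : Int) from rfl]
        rw [foldB_nat split_sign ws cuts [] 0 (fun c hc => by have := hmem c hc; omega)]
        simp only []
        rw [PySem.List.slice_from_natCast]
        have hsegs := foldB_segs split_sign ws (cuts.map Int.toNat) [] 0 hpairN
          (fun c hc => ⟨(hbN c hc).1, (hbN c hc).2⟩)
        simp only [List.nil_append, List.drop_zero, Nat.sub_zero, List.map_id'] at hsegs
        rw [hsegs]
      · -- negative step (word_index ≠ 0)
        have hneg : word_index < 0 := by omega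
        rw [pyRange_neg_nil word_index (ws.length : Int) word_index hneg (by omega)]
        simp only [List.foldl_nil, List.nil_append]
        rw [PySem.List.slice_from _ (le_refl 0)]
        simp only [Int.toNat_zero, List.drop_zero]
        rw [joinS_singleton]

-- ===== VERDICT (by name: the statement is the Claim_ definition above) =====
theorem add_newline_spec : Claim_equal_add_newline := by
  intro s split_sign word_index _hdom hpre
  unfold Spec_add_newline
  exact add_newline_eq s split_sign word_index hpre
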